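-- pv_equiv track=rewrite | github.com/GundalaNikhil/DSA | dsa-problems/NumberTheory/solutions/python/NUM-016-count-surjective-functions.py | count_surjections
-- ===== SOURCE A (Python) =====
-- def power(base, exp, mod):
--     res = 1
--     base %= mod
--     while exp > 0:
--         if exp % 2 == 1:
--             res = (res * base) % mod
--         base = (base * base) % mod
--         exp //= 2
--     return res
--
-- def count_surjections(n: int, k: int) -> int:
--     MOD = 1000000007
--
--     if k > n:
--         return 0
--
--     # Precompute Combinations
--     C = [[0] * (k + 1) for _ in range(k + 1)]
--     for i in range(k + 1):
--         C[i][0] = 1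
--         for j in range(1, i + 1):
--             C[i][j] = (C[i - 1][j - 1] + C[i - 1][j]) % MOD
--
--     ans = 0
--     for i in range(k + 1):
--         term = (C[k][i] * power(k - i, n, MOD)) % MOD
--         if i % 2 == 1:
--             ans = (ans - term + MOD) % MOD
--         else:
--             ans = (ans + term) % MOD
--
--     return ans
-- ===== SOURCE B (Python) =====
-- def count_surjections(n: int, k: int) -> int:
--     MOD = 1000000007
--     if k > n:
--         return 0
--     ans = 0
--     binom = 1  # exact C(k, i), maintained incrementally instead of a Pascal table
--     for i in range(k + 1):
--         term = binom % MOD * pow(k - i, n, MOD) % MOD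
--         if i % 2 == 1:
--             ans = (ans - term) % MOD
--         else:
--             ans = (ans + term) % MOD
--         binom = binom * (k - i) // (i + 1)
--     return ans
-- ===== Notes on version B (the rewrite author's own statement) =====
-- stated objective: alternative
-- what changed: Replaces the O(k^2) Pascal-triangle table with a single exact binomial coefficient maintained incrementally (binom = binom*(k-i)//(i+1)) inside the one inclusion-exclusion pass.
import Mathlib
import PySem

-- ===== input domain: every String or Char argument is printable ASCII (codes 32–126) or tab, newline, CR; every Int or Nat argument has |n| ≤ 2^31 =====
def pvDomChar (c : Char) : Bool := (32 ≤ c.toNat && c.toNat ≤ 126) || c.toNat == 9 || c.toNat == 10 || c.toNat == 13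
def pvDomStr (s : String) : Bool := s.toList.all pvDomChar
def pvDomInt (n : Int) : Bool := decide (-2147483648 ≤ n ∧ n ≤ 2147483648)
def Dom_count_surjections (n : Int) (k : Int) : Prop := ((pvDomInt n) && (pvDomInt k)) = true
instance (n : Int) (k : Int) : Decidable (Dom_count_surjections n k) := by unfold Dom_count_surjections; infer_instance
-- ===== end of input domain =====

-- B replaces A's Pascal-triangle table by one exact binomial coefficient maintained
-- incrementally across the single inclusion-exclusion pass (objective: alternative).


-- ===== PORT A =====
-- the while-loop of Python's `power` helper (also built-in pow(b, e, m), which B calls)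
def pvPowGo (res base exp md : Int) : Int :=
  if _h : exp > 0 then
    let res' := if PySem.Int.mod exp 2 = 1 then PySem.Int.mod (res * base) md else res
    pvPowGo res' (PySem.Int.mod (base * base) md) (PySem.Int.floordiv exp 2) md
  else res
termination_by exp.toNat
decreasing_by
  rw [PySem.Int.floordiv_eq_ediv_of_pos (by omega)]
  omega

def power (base exp md : Int) : Int := pvPowGo 1 (PySem.Int.mod base md) exp md

def count_surjections (n : Int) (k : Int) : Int :=
  if k > n then 0
  else
    let MOD : Int := 1000000007
    -- indices i, j in these loops are nonnegative (i ∈ range(0,k+1), j ∈ range(1,i+1)), so .toNat is exact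
    let C0 : List (List Int) := List.replicate (k+1).toNat (List.replicate (k+1).toNat 0)
    let C := (PySem.List.pyRange 0 (k+1) 1).foldl (fun C i =>
        let C1 := C.set i.toNat ((C.getD i.toNat []).set 0 1)
        (PySem.List.pyRange 1 (i+1) 1).foldl (fun C2 j =>
            C2.set i.toNat ((C2.getD i.toNat []).set j.toNat
              (PySem.Int.mod (((C2.getD (i-1).toNat []).getD (j-1).toNat 0)
                              + ((C2.getD (i-1).toNat []).getD j.toNat 0)) MOD)))
          C1) C0
    (PySem.List.pyRange 0 (k+1) 1).foldl (fun ans i =>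
        let term := PySem.Int.mod (((C.getD k.toNat []).getD i.toNat 0) * power (k - i) n MOD) MOD
        if PySem.Int.mod i 2 = 1 then PySem.Int.mod (ans - term + MOD) MOD
        else PySem.Int.mod (ans + term) MOD) 0

-- ===== PORT B =====
-- state (ans, binom): binom is the exact integer C(k, i), updated by binom * (k-i) // (i+1)
def count_surjections_alt (n : Int) (k : Int) : Int :=
  if k > n then 0
  else
    let MOD : Int := 1000000007
    ((PySem.List.pyRange 0 (k+1) 1).foldl (fun (st : Int × Int) i =>
        let term := PySem.Int.mod (PySem.Int.mod st.2 MOD * power (k - i) n MOD) MOD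
        let ans' := if PySem.Int.mod i 2 = 1 then PySem.Int.mod (st.1 - term) MOD
                    else PySem.Int.mod (st.1 + term) MOD
        (ans', PySem.Int.floordiv (st.2 * (k - i)) (i + 1))) ((0 : Int), (1 : Int))).1

-- ===== PRECONDITION & SPEC =====
def Spec_count_surjections (n : Int) (k : Int) (out : Int) : Prop := out = count_surjections_alt n k
instance (n : Int) (k : Int) (out : Int) : Decidable (Spec_count_surjections n k out) := by unfold Spec_count_surjections; infer_instance

-- ===== CLAIM (what is proved, stated in full; the proofs are below) =====
def Claim_equal_count_surjections : Prop := ∀ (n : Int) (k : Int), Dom_count_surjections n k → Spec_count_surjections n k (count_surjections n k)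

-- ===== LEMMAS AND PROOFS =====

-- named forms of the two loop bodies (definitionally the ports' lambdas)
def pvStepOut (C : List (List Int)) (i : Int) : List (List Int) :=
  let C1 := C.set i.toNat ((C.getD i.toNat []).set 0 1)
  (PySem.List.pyRange 1 (i+1) 1).foldl (fun C2 j =>
      C2.set i.toNat ((C2.getD i.toNat []).set j.toNat
        (PySem.Int.mod (((C2.getD (i-1).toNat []).getD (j-1).toNat 0)
                        + ((C2.getD (i-1).toNat []).getD j.toNat 0)) 1000000007)))
    C1

def pvTable (k : Int) : List (List Int) :=
  (PySem.List.pyRange 0 (k+1) 1).foldl pvStepOut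
    (List.replicate (k+1).toNat (List.replicate (k+1).toNat 0))

def pvStepA (row : List Int) (n k : Int) (ans i : Int) : Int :=
  let term := PySem.Int.mod ((row.getD i.toNat 0) * power (k - i) n 1000000007) 1000000007
  if PySem.Int.mod i 2 = 1 then PySem.Int.mod (ans - term + 1000000007) 1000000007
  else PySem.Int.mod (ans + term) 1000000007

def pvStepB (n k : Int) (st : Int × Int) (i : Int) : Int × Int :=
  let term := PySem.Int.mod (PySem.Int.mod st.2 1000000007 * power (k - i) n 1000000007) 1000000007
  let ans' := if PySem.Int.mod i 2 = 1 then PySem.Int.mod (st.1 - term) 1000000007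
              else PySem.Int.mod (st.1 + term) 1000000007
  (ans', PySem.Int.floordiv (st.2 * (k - i)) (i + 1))

lemma pvA_eq (n k : Int) : count_surjections n k =
    if k > n then 0
    else (PySem.List.pyRange 0 (k+1) 1).foldl (pvStepA ((pvTable k).getD k.toNat []) n k) 0 := rfl

lemma pvB_eq (n k : Int) : count_surjections_alt n k =
    if k > n then 0
    else ((PySem.List.pyRange 0 (k+1) 1).foldl (pvStepB n k) ((0 : Int), (1 : Int))).1 := rfl

lemma pvGetD_set_self {α} (l : List α) (nn : ℕ) (a d : α) (h : nn < l.length) :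
    (l.set nn a).getD nn d = a := by
  simp [List.getD, h]

lemma pvGetD_set_ne {α} (l : List α) (nn m : ℕ) (a : α) (d : α) (h : nn ≠ m) :
    (l.set nn a).getD m d = l.getD m d := by
  simp [List.getD, h]

-- localize the inner loop's table mutations to a pure fold on row iN
lemma pvInnerLoc (g : List Int → Int → Int) (iN prevN : ℕ) (hne : prevN ≠ iN)
    (js : List Int) (C : List (List Int)) (h : iN < C.length) :
    js.foldl (fun C2 j => C2.set iN ((C2.getD iN []).set j.toNat (g (C2.getD prevN []) j))) C
      = C.set iN (js.foldl (fun r j => r.set j.toNat (g (C.getD prevN []) j)) (C.getD iN [])) := by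
  induction js generalizing C with
  | nil =>
    simp only [List.foldl_nil]
    conv_lhs => rw [← List.set_getElem_self h]
    simp [List.getD, h]
  | cons j js ih =>
    simp only [List.foldl_cons]
    rw [ih _ (by simpa using h)]
    rw [pvGetD_set_ne _ _ _ _ _ (fun e => hne e.symm), pvGetD_set_self _ _ _ _ h, List.set_set]

-- the inner loop computes row i of Pascal's triangle mod p
lemma pvRowAux (K i : ℕ) (hi : i ≤ K) (prev r0 : List Int)
    (hp : ∀ j, j < K+1 → prev.getD j 0 = ((i-1).choose j : Int) % 1000000007)
    (hr0len : r0.length = K+1) (hr00 : r0.getD 0 0 = 1)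
    (hr0 : ∀ j, 0 < j → r0.getD j 0 = 0) :
    ∀ t, t ≤ i →
    let r := (PySem.List.pyRange 1 ((t : Int)+1) 1).foldl
      (fun r j => r.set j.toNat
        (PySem.Int.mod ((prev.getD (j-1).toNat 0) + (prev.getD j.toNat 0)) 1000000007)) r0
    r.length = K+1 ∧ r.getD 0 0 = 1 ∧
      ∀ j, 0 < j → j < K+1 → r.getD j 0 = if j ≤ t then (i.choose j : Int) % 1000000007 else 0 := by
  intro t
  induction t with
  | zero =>
    intro _
    rw [PySem.List.pyRange_one_eq_nil (by norm_num)]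
    refine ⟨hr0len, hr00, ?_⟩
    intro j hj _
    rw [if_neg (by omega : ¬ j ≤ 0)]
    exact hr0 j hj
  | succ t ih =>
    intro hti
    have h1 : ((t+1 : ℕ) : Int) + 1 = (((t : ℕ) : Int) + 1) + 1 := by push_cast; ring
    rw [h1, PySem.List.pyRange_one_succ_right (by omega), List.foldl_append]
    obtain ⟨hlen, h0, hj⟩ := ih (by omega)
    simp only [List.foldl_cons, List.foldl_nil]
    have htoNat : ((t : Int) + 1).toNat = t + 1 := by omega
    have htoNat' : ((t : Int) + 1 - 1).toNat = t := by omega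
    have hval : PySem.Int.mod ((prev.getD ((t : Int) + 1 - 1).toNat 0) + (prev.getD ((t : Int) + 1).toNat 0)) 1000000007
        = (i.choose (t+1) : Int) % 1000000007 := by
      rw [htoNat, htoNat', hp t (by omega), hp (t+1) (by omega),
          PySem.Int.mod_eq_emod_of_pos (by norm_num), ← Int.add_emod]
      congr 1
      have : i = (i-1) + 1 := by omega
      rw [this, Nat.choose_succ_succ]
      push_cast; ring
    rw [hval, htoNat]
    have hlt : t + 1 < K + 1 := by omega
    refine ⟨by simpa using hlen, ?_, ?_⟩
    · rw [pvGetD_set_ne _ _ _ _ _ (by omega)]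
      exact h0
    · intro j hj0 hjK
      by_cases hje : j = t + 1
      · subst hje
        rw [pvGetD_set_self _ _ _ _ (by omega)]
        simp
      · rw [pvGetD_set_ne _ _ _ _ _ (fun e => hje e.symm), hj j hj0 hjK]
        rcases Nat.lt_or_ge j (t+1) with h | h
        · rw [if_pos (by omega), if_pos (by omega)]
        · rw [if_neg (by omega), if_neg (by omega)]

lemma pvRowFold (K i : ℕ) (hi : i ≤ K) (prev r0 : List Int)
    (hp : ∀ j, j < K+1 → prev.getD j 0 = ((i-1).choose j : Int) % 1000000007)
    (hr0len : r0.length = K+1) (hr00 : r0.getD 0 0 = 1)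
    (hr0 : ∀ j, 0 < j → r0.getD j 0 = 0) :
    let r := (PySem.List.pyRange 1 ((i : Int)+1) 1).foldl
      (fun r j => r.set j.toNat
        (PySem.Int.mod ((prev.getD (j-1).toNat 0) + (prev.getD j.toNat 0)) 1000000007)) r0
    r.length = K+1 ∧ ∀ j, j < K+1 → r.getD j 0 = (i.choose j : Int) % 1000000007 := by
  obtain ⟨hlen, h0, hj⟩ := pvRowAux K i hi prev r0 hp hr0len hr00 hr0 i (le_refl _)
  refine ⟨hlen, ?_⟩
  intro j hjK
  rcases Nat.eq_zero_or_pos j with rfl | hj0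
  · rw [h0]; norm_num
  · rw [hj j hj0 hjK]
    by_cases hji : j ≤ i
    · rw [if_pos hji]
    · rw [if_neg hji, Nat.choose_eq_zero_of_lt (by omega)]
      norm_num

-- the outer loop: after processing range(0, t), rows below t hold binomials mod p, the rest are zero
lemma pvOuter (K t : ℕ) (ht : t ≤ K+1) :
    let C := (PySem.List.pyRange 0 (t : Int) 1).foldl pvStepOut
      (List.replicate (K+1) (List.replicate (K+1) (0 : Int)))
    C.length = K+1 ∧ (∀ m, m < K+1 → (C.getD m []).length = K+1) ∧
      (∀ m j, m < K+1 → j < K+1 →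
        (C.getD m []).getD j 0 = if m < t then (m.choose j : Int) % 1000000007 else 0) := by
  induction t with
  | zero =>
    rw [PySem.List.pyRange_one_eq_nil (by omega)]
    refine ⟨by simp, ?_, ?_⟩
    · intro m hm
      rw [List.getD_eq_getElem _ _ (by simpa using hm)]
      simp
    · intro m j hm hj
      rw [if_neg (by omega)]
      simp only [List.foldl_nil]
      have hrepl : (List.replicate (K+1) (List.replicate (K+1) (0:Int))).getD m [] = List.replicate (K+1) 0 := by
        rw [List.getD_eq_getElem _ _ (by simpa using hm)]
        exact List.getElem_replicate _
      rw [hrepl, List.getD_eq_getElem _ _ (by simpa using hj)]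
      exact List.getElem_replicate _
  | succ t ih =>
    obtain ⟨hlen, hrlen, hent⟩ := ih (by omega)
    have hcast : ((t+1 : ℕ) : Int) = ((t : ℕ) : Int) + 1 := by push_cast; ring
    rw [hcast, PySem.List.pyRange_one_succ_right (by omega), List.foldl_append]
    simp only [List.foldl_cons, List.foldl_nil]
    set Ct := (PySem.List.pyRange 0 ((t : ℕ) : Int) 1).foldl pvStepOut
      (List.replicate (K+1) (List.replicate (K+1) (0 : Int))) with hCt
    have htK : t < K + 1 := by omega
    have hCtlen : Ct.length = K + 1 := hlen
    have hrowtlen : (Ct.getD t []).length = K + 1 := hrlen t htK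
    have hrowt0 : ∀ j, j < K + 1 → (Ct.getD t []).getD j 0 = 0 := by
      intro j hj
      rw [hent t j htK hj, if_neg (by omega)]
    -- r0 = row t after the C[i][0] = 1 write
    set r0 : List Int := (Ct.getD t []).set 0 1 with hr0def
    have hr0len : r0.length = K + 1 := by rw [hr0def, List.length_set]; exact hrowtlen
    have hr00 : r0.getD 0 0 = 1 := pvGetD_set_self _ _ _ _ (by omega)
    have hr0z : ∀ j, 0 < j → r0.getD j 0 = 0 := by
      intro j hj0
      rw [hr0def, pvGetD_set_ne _ _ _ _ _ (by omega)]
      by_cases hjK : j < K + 1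
      · exact hrowt0 j hjK
      · exact List.getD_eq_default _ _ (by omega)
    have key : ∃ row : List Int, pvStepOut Ct ((t : ℕ) : Int) = Ct.set t row ∧
        row.length = K+1 ∧ ∀ j, j < K+1 → row.getD j 0 = ((t.choose j : ℕ) : Int) % 1000000007 := by
      have htoNat : ((t : ℕ) : Int).toNat = t := by omega
      have htoNat1 : (((t : ℕ) : Int) - 1).toNat = t - 1 := by omega
      unfold pvStepOut
      simp only [htoNat, htoNat1, ← hr0def]
      rcases Nat.eq_zero_or_pos t with rfl | ht1
      · refine ⟨r0, ?_, hr0len, ?_⟩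
        · rw [PySem.List.pyRange_one_eq_nil (by omega), List.foldl_nil]
        · intro j hjK
          rcases Nat.eq_zero_or_pos j with rfl | hj0
          · rw [hr00]; norm_num
          · rw [hr0z j hj0, Nat.choose_eq_zero_of_lt (by omega)]; norm_num
      · have hne : t - 1 ≠ t := by omega
        have hC1len : t < (Ct.set t r0).length := by rw [List.length_set]; omega
        rw [pvInnerLoc (fun prev j =>
              PySem.Int.mod ((prev.getD (j-1).toNat 0) + (prev.getD j.toNat 0)) 1000000007)
            t (t-1) hne _ _ hC1len]
        rw [pvGetD_set_ne _ _ _ _ _ (fun e => hne e.symm), pvGetD_set_self _ _ _ _ (by omega)]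
        have hprev : ∀ j, j < K+1 → (Ct.getD (t-1) []).getD j 0 = ((t-1).choose j : Int) % 1000000007 := by
          intro j hj
          rw [hent (t-1) j (by omega) hj, if_pos (by omega)]
        obtain ⟨hrlen2, hrent⟩ := pvRowFold K t (by omega) (Ct.getD (t-1) []) r0 hprev hr0len hr00 hr0z
        exact ⟨_, by rw [List.set_set], hrlen2, hrent⟩
    obtain ⟨row, hres, hrowlen, hrowent⟩ := key
    rw [hres]
    refine ⟨by simpa using hCtlen, ?_, ?_⟩
    · intro m hm
      by_cases hmt : m = t
      · subst hmt; rw [pvGetD_set_self _ _ _ _ (by omega)]; exact hrowlen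
      · rw [pvGetD_set_ne _ _ _ _ _ (fun e => hmt e.symm)]; exact hrlen m hm
    · intro m j hm hj
      by_cases hmt : m = t
      · subst hmt
        rw [pvGetD_set_self _ _ _ _ (by omega), if_pos (by omega)]
        exact hrowent j hj
      · rw [pvGetD_set_ne _ _ _ _ _ (fun e => hmt e.symm), hent m j hm hj]
        by_cases hmlt : m < t
        · rw [if_pos hmlt, if_pos (by omega)]
        · rw [if_neg hmlt, if_neg (by omega)]

-- the two summation loops agree, given row k of the table holds C(k, ·) mod p
lemma pvAddP (a : Int) : (a + 1000000007) % 1000000007 = a % 1000000007 := by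
  have := Int.add_mul_emod_self_left a 1000000007 1
  simp only [mul_one] at this
  exact this

lemma pvSum (K : ℕ) (n : Int) (row : List Int)
    (hrow : ∀ i, i < K+1 → row.getD i 0 = (K.choose i : Int) % 1000000007) :
    ∀ s : ℕ, s ≤ K+1 → ∀ ans binom : Int, binom = (K.choose s : Int) →
    (PySem.List.pyRange (s : Int) ((K : Int)+1) 1).foldl (pvStepA row n (K : Int)) ans
      = ((PySem.List.pyRange (s : Int) ((K : Int)+1) 1).foldl (pvStepB n (K : Int)) (ans, binom)).1 := by
  suffices h : ∀ d s : ℕ, s + d = K + 1 → ∀ ans binom : Int, binom = (K.choose s : Int) →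
      (PySem.List.pyRange (s : Int) ((K : Int)+1) 1).foldl (pvStepA row n (K : Int)) ans
        = ((PySem.List.pyRange (s : Int) ((K : Int)+1) 1).foldl (pvStepB n (K : Int)) (ans, binom)).1 by
    intro s hs ans binom hb
    exact h (K+1-s) s (by omega) ans binom hb
  intro d
  induction d with
  | zero =>
    intro s hs ans binom hb
    rw [PySem.List.pyRange_one_eq_nil (by omega)]
    simp
  | succ d ih =>
    intro s hs ans binom hb
    rw [PySem.List.pyRange_one_cons (by omega : ((s:ℕ) : Int) < ((K:ℕ) : Int)+1)]
    simp only [List.foldl_cons]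
    have hb' : PySem.Int.floordiv (binom * (((K:ℕ) : Int) - ((s:ℕ) : Int))) (((s:ℕ) : Int) + 1)
        = (K.choose (s+1) : Int) := by
      have hKs : ((K:ℕ) : Int) - ((s:ℕ) : Int) = ((K - s : ℕ) : Int) := by omega
      rw [hb, hKs, PySem.Int.floordiv_eq_ediv_of_pos (by omega)]
      have : (K.choose s : Int) * ((K - s : ℕ) : Int) = (K.choose (s+1) : Int) * (((s:ℕ) : Int) + 1) := by
        exact_mod_cast congrArg (Nat.cast (R := Int)) (Nat.choose_succ_right_eq K s).symm
      rw [this, Int.mul_ediv_cancel _ (by omega)]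
    have hstep : pvStepB n ((K:ℕ) : Int) (ans, binom) ((s:ℕ) : Int)
        = (pvStepA row n ((K:ℕ) : Int) ans ((s:ℕ) : Int), (K.choose (s+1) : Int)) := by
      unfold pvStepA pvStepB
      have hterm : PySem.Int.mod binom 1000000007 = row.getD ((s:ℕ) : Int).toNat 0 := by
        simp only [Int.toNat_natCast]
        rw [hb, hrow s (by omega), PySem.Int.mod_eq_emod_of_pos (by norm_num)]
      rw [Prod.ext_iff]
      constructor
      · simp only [hterm]
        by_cases hpar : PySem.Int.mod ((s:ℕ) : Int) 2 = 1
        · rw [if_pos hpar, if_pos hpar]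
          simp only [PySem.Int.mod_eq_emod_of_pos (by norm_num : (0:Int) < 1000000007)]
          exact (pvAddP _).symm
        · rw [if_neg hpar, if_neg hpar]
      · simpa using hb'
    rw [hstep]
    have hcast : (((s+1 : ℕ)) : Int) = ((s:ℕ) : Int) + 1 := by push_cast; ring
    have := ih (s+1) (by omega) (pvStepA row n ((K:ℕ) : Int) ans ((s:ℕ) : Int)) ((K.choose (s+1) : ℕ) : Int) rfl
    rw [hcast] at this
    exact this

-- ===== VERDICT (by name: the statement is the Claim_ definition above) =====
theorem count_surjections_spec : Claim_equal_count_surjections := by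
  intro n k _hdom
  unfold Spec_count_surjections
  rw [pvA_eq, pvB_eq]
  by_cases hkn : k > n
  · simp [hkn]
  · simp only [hkn, if_false]
    by_cases hk : k < 0
    · rw [PySem.List.pyRange_one_eq_nil (by omega)]
      simp
    · have hk0 : 0 ≤ k := by omega
      obtain ⟨K, rfl⟩ : ∃ K : ℕ, k = (K : Int) := ⟨k.toNat, by omega⟩
      have htab := pvOuter K (K+1) (le_refl _)
      have hrow : ∀ i, i < K+1 →
          ((pvTable (K : Int)).getD (K : Int).toNat []).getD i 0
            = (K.choose i : Int) % 1000000007 := by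
        intro i hiK
        have : pvTable (K : Int) = (PySem.List.pyRange 0 ((K+1 : ℕ) : Int) 1).foldl pvStepOut
            (List.replicate (K+1) (List.replicate (K+1) (0 : Int))) := by
          unfold pvTable
          norm_num
        rw [this]
        have := (htab.2.2) K i (by omega) hiK
        simpa using this
      have := pvSum K n ((pvTable (K : Int)).getD (K : Int).toNat []) hrow 0 (by omega) 0 1 (by simp)
      simpa using this
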